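-- pv_equiv track=rewrite | github.com/Khasirah/hacker-rank | utopia_tree.py | utopiaTree
-- ===== SOURCE A (Python) =====
-- def utopiaTree(n):
--     # tinggi awal
--     ta = 1
--     for n_itr in range(n+1):
--         if n_itr == 0:
--             continue
--         if n_itr % 2 == 1:
--             ta *= 2
--         if n_itr % 2 == 0:
--             ta += 1
--
--     return ta
-- ===== SOURCE B (Python) =====
-- def utopiaTree(n):
--     # closed form: after n cycles with k = n//2 completed year-pairs,
--     # even n -> 2**(k+1) - 1, odd n -> 2**(k+2) - 2; no cycles (n <= 0) -> height 1
--     if n <= 0: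
--         return 1
--     k = n // 2
--     if n % 2 == 0:
--         return (1 << (k + 1)) - 1
--     return (1 << (k + 2)) - 2
-- ===== Notes on version B (the rewrite author's own statement) =====
-- stated objective: faster
-- what changed: Replaced the O(n) growth loop by a closed-form parity formula using powers of two (bit shifts); intended as faster, with the probe's measured ratio growing with n though the largest size could not be confirmed.
import Mathlib
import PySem

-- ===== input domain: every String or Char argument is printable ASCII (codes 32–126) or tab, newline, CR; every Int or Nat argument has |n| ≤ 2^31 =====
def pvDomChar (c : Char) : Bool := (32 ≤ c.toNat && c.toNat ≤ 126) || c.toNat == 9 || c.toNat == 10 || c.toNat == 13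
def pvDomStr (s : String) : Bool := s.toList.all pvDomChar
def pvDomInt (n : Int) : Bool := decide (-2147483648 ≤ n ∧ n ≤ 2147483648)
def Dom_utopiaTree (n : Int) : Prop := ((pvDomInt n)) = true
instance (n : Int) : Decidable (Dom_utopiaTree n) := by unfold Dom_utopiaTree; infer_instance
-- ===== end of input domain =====

-- B replaces A's O(n) growth loop by a closed-form parity formula (intended as faster; a timing run measured a speed ratio growing with n, though it could not confirm the largest size).

-- ===== PORT A =====
-- the loop body of A (continue on n_itr == 0; double on odd, add one on even)
def pvStep (ta n_itr : Int) : Int :=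
  if n_itr = 0 then ta
  else
    let ta := if PySem.Int.mod n_itr 2 = 1 then ta * 2 else ta
    if PySem.Int.mod n_itr 2 = 0 then ta + 1 else ta

def utopiaTree (n : Int) : Int :=
  (PySem.List.pyRange 0 (n + 1) 1).foldl pvStep 1

-- ===== PORT B =====
def utopiaTree_alt (n : Int) : Int :=
  if n ≤ 0 then 1
  else
    let k := PySem.Int.floordiv n 2
    if PySem.Int.mod n 2 = 0 then 2 ^ (k + 1).toNat - 1
    else 2 ^ (k + 2).toNat - 2

-- ===== PRECONDITION & SPEC =====
def Spec_utopiaTree (n : Int) (out : Int) : Prop := out = utopiaTree_alt n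
instance (n : Int) (out : Int) : Decidable (Spec_utopiaTree n out) := by unfold Spec_utopiaTree; infer_instance

-- ===== CLAIM (what is proved, stated in full; the proofs are below) =====
def Claim_equal_utopiaTree : Prop := ∀ (n : Int), Dom_utopiaTree n → Spec_utopiaTree n (utopiaTree n)

-- ===== LEMMAS AND PROOFS =====

-- closed form over Nat: height after m growth cycles
def pvCF (m : Nat) : Int :=
  if m % 2 = 0 then 2 ^ (m / 2 + 1) - 1 else 2 ^ (m / 2 + 2) - 2

lemma pvMod_cast (m : Nat) : PySem.Int.mod (m : Int) 2 = ((m % 2 : Nat) : Int) := by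
  simp [PySem.Int.mod, Int.fmod_eq_emod]

lemma pvA_eq_cf (m : Nat) : utopiaTree (m : Int) = pvCF m := by
  induction m with
  | zero => decide
  | succ k ih =>
    have h2 : utopiaTree ((k + 1 : Nat) : Int) =
        (PySem.List.pyRange 0 ((k : Int) + 1 + 1) 1).foldl pvStep 1 := by
      unfold utopiaTree; push_cast; ring_nf
    rw [h2, PySem.List.pyRange_one_succ_right (by positivity), List.foldl_append]
    simp only [List.foldl]
    rw [show (PySem.List.pyRange 0 ((k : Int) + 1) 1).foldl pvStep 1 = utopiaTree (k : Int) from rfl, ih]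
    have hne : ((k : Int) + 1) ≠ 0 := by positivity
    have hcast : ((k : Int) + 1) = ((k + 1 : Nat) : Int) := by push_cast; ring
    unfold pvStep pvCF
    rw [if_neg hne, hcast, pvMod_cast]
    by_cases e0 : k % 2 = 0
    · have e1 : (k + 1) % 2 = 1 := by omega
      have ed : (k + 1) / 2 = k / 2 := by omega
      rw [e1, e0]
      norm_num [ed]
      ring
    · have e1 : (k + 1) % 2 = 0 := by omega
      have ed : (k + 1) / 2 = k / 2 + 1 := by omega
      rw [e1, if_neg e0]
      norm_num [ed]
      ring

lemma pvCF_eq_alt (m : Nat) (hm : 0 < m) : pvCF m = utopiaTree_alt (m : Int) := by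
  have hn : ¬ ((m : Int) ≤ 0) := by exact_mod_cast Nat.not_le.mpr hm
  have hdiv : PySem.Int.floordiv (m : Int) 2 = ((m / 2 : Nat) : Int) := by
    simp [PySem.Int.floordiv, Int.fdiv_eq_ediv]
  unfold utopiaTree_alt pvCF
  rw [if_neg hn, hdiv, pvMod_cast]
  by_cases e0 : m % 2 = 0
  · rw [e0]
    norm_num
    congr 1
  · have e0' : m % 2 = 1 := by omega
    rw [e0']
    norm_num
    congr 1

-- ===== VERDICT (by name: the statement is the Claim_ definition above) =====
theorem utopiaTree_spec : Claim_equal_utopiaTree := by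
  intro n _
  unfold Spec_utopiaTree
  by_cases hle : n ≤ 0
  · rw [utopiaTree_alt, if_pos hle]
    unfold utopiaTree
    by_cases heq : n = 0
    · subst heq; decide
    · rw [PySem.List.pyRange_one_eq_nil (by omega)]
      rfl
  · have hpos : 0 < n := by omega
    obtain ⟨m, rfl⟩ := Int.eq_ofNat_of_zero_le hpos.le
    rw [pvA_eq_cf, pvCF_eq_alt m (by exact_mod_cast hpos)]
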